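-- pv_equiv track=rewrite | github.com/GeorgianaLoba/Artificial-Intelligence | lab3/utils.py | count_vertically
-- ===== SOURCE A (Python) =====
-- def count_vertically(tuples, n):
--     score=0
--     for k in range(0,n):
--         each=[]
--         for tup in tuples:
--             each.append(tup[k])
--         score+=(len(each)-len(set(each)))
--     return score
-- ===== SOURCE B (Python) =====
-- def count_vertically(tuples, n):
--     # Single row-major pass: per-column seen-sets maintained incrementally,
--     # counting re-encounters instead of building each full column.
--     score = 0
--     seen = [set() for _ in range(n)]
--     for tup in tuples:
--         for k in range(n):
--             if tup[k] in seen[k]: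
--                 score += 1
--             else:
--                 seen[k].add(tup[k])
--     return score
-- ===== Notes on version B (the rewrite author's own statement) =====
-- stated objective: alternative
-- what changed: Column-major 'build each column then subtract set size' is replaced by a single row-major pass that maintains one incremental seen-set per column and counts re-encounters.
import Mathlib
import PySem

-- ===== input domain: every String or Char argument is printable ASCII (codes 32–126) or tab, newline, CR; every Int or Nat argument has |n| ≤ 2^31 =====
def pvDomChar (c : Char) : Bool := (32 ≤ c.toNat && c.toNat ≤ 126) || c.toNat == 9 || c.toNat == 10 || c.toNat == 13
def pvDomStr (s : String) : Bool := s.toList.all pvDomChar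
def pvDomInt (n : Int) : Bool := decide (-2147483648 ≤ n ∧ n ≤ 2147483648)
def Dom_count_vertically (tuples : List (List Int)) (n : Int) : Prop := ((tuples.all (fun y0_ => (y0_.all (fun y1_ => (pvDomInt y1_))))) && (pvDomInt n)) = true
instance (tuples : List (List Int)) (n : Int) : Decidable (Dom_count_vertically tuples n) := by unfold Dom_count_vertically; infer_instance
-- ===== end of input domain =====

-- B replaces the column-major "build column k, subtract set size" double pass by a single
-- row-major pass maintaining one incremental seen-set per column and counting re-encounters.


-- ===== PORT A =====
-- tup[k] is PySem.List.pyGetD (exact under Pre_: every row has length ≥ n, so k is in range)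
def count_vertically (tuples : List (List Int)) (n : Int) : Int :=
  (PySem.List.pyRange 0 n 1).foldl (fun score k =>
    let each : List Int :=
      tuples.foldl (fun each tup => each ++ [PySem.List.pyGetD tup k 0]) []
    score + ((each.length : Int) - ((PySem.Set.ofList each).length : Int))) 0

-- ===== PORT B =====
-- tup[k] is PySem.List.pyGetD (exact under Pre_); seen[k].add(v), an in-place mutation,
-- is ported as writing the enlarged set back at position k (PySem.List.pySetD).
def count_vertically_alt (tuples : List (List Int)) (n : Int) : Int :=
  (tuples.foldl (fun (st : Int × List (PySem.Set Int)) tup =>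
    (PySem.List.pyRange 0 n 1).foldl (fun st k =>
      let v := PySem.List.pyGetD tup k 0
      let s := PySem.List.pyGetD st.2 k PySem.Set.empty
      if PySem.Set.contains s v then (st.1 + 1, st.2)
      else (st.1, PySem.List.pySetD st.2 k (PySem.Set.add s v))) st)
    (0, (PySem.List.pyRange 0 n 1).map (fun _ => PySem.Set.empty))).1

-- ===== PRECONDITION & SPEC =====
-- Pre_ excludes exactly the ragged/short inputs on which Python's tup[k] raises IndexError
-- (both A and B raise there): every row must have length ≥ n.
def Pre_count_vertically (tuples : List (List Int)) (n : Int) : Prop :=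
  ∀ tup ∈ tuples, n ≤ (tup.length : Int)
instance (tuples : List (List Int)) (n : Int) : Decidable (Pre_count_vertically tuples n) := by
  unfold Pre_count_vertically; infer_instance
def pvWitness_count_vertically : List (List Int) × Int := ([[1, 2], [1, 3], [4, 3]], 2)

def Spec_count_vertically (tuples : List (List Int)) (n : Int) (out : Int) : Prop :=
  out = count_vertically_alt tuples n
instance (tuples : List (List Int)) (n : Int) (out : Int) : Decidable (Spec_count_vertically tuples n out) := by
  unfold Spec_count_vertically; infer_instance

-- ===== CLAIM (what is proved, stated in full; the proofs are below) =====
def Claim_equal_count_vertically : Prop := ∀ (tuples : List (List Int)) (n : Int), Dom_count_vertically tuples n → Pre_count_vertically tuples n → Spec_count_vertically tuples n (count_vertically tuples n)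

-- ===== LEMMAS AND PROOFS =====

-- duplicates in one column
def pvDups (xs : List Int) : Int := (xs.length : Int) - ((PySem.Set.ofList xs).length : Int)

-- column j of the processed rows (total form matching the ports' pyGetD default)
def pvCol (rows : List (List Int)) (j : Nat) : List Int := rows.map (fun tup => tup.getD j 0)

-- B's inner-loop step, named (definitionally the lambda in count_vertically_alt)
def pvStep (tup : List Int) (st : Int × List (PySem.Set Int)) (k : Int) :
    Int × List (PySem.Set Int) :=
  let v := PySem.List.pyGetD tup k 0
  let sq := PySem.List.pyGetD st.2 k PySem.Set.empty
  if PySem.Set.contains sq v then (st.1 + 1, st.2)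
  else (st.1, PySem.List.pySetD st.2 k (PySem.Set.add sq v))

-- B's inner loop, abstractly: per-position result on the list of seen-sets,
-- reading tup at absolute positions a, a+1, …
def pvNewSets (tup : List Int) (a : Nat) : List (PySem.Set Int) → List (PySem.Set Int)
  | [] => []
  | st :: rest => PySem.Set.add st (tup.getD a 0) :: pvNewSets tup (a + 1) rest

def pvScoreInc (tup : List Int) (a : Nat) : List (PySem.Set Int) → Int
  | [] => 0
  | st :: rest => (if tup.getD a 0 ∈ st then 1 else 0) + pvScoreInc tup (a + 1) rest

theorem pv_set_middle {α : Type} (p : List α) (x v : α) (r : List α) :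
    (p ++ x :: r).set p.length v = p ++ v :: r := by
  induction p with
  | nil => simp
  | cons h t ih => simp [ih]

theorem pv_getD_middle {α : Type} (p : List α) (x : α) (r : List α) (d : α) :
    (p ++ x :: r).getD p.length d = x := by
  induction p with
  | nil => simp
  | cons h t ih => simp [ih]

theorem pv_inner (tup : List Int) (sets : List (PySem.Set Int)) :
    ∀ (prefix_ : List (PySem.Set Int)) (s : Int),
    ((List.range sets.length).map (fun j => ((prefix_.length + j : Nat) : Int))).foldl
      (pvStep tup) (s, prefix_ ++ sets)
    = (s + pvScoreInc tup prefix_.length sets, prefix_ ++ pvNewSets tup prefix_.length sets) := by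
  induction sets with
  | nil => intro p s; simp [pvScoreInc, pvNewSets]
  | cons st rest ih =>
    intro p s
    simp only [List.length_cons]
    rw [List.range_succ_eq_map]
    simp only [List.map_cons, List.map_map, List.foldl_cons, Nat.add_zero]
    have hv : PySem.List.pyGetD tup ((p.length : Nat) : Int) 0 = tup.getD p.length 0 :=
      PySem.List.pyGetD_natCast tup p.length 0
    have hs : PySem.List.pyGetD (p ++ st :: rest) ((p.length : Nat) : Int) PySem.Set.empty = st := by
      rw [PySem.List.pyGetD_natCast]; exact pv_getD_middle p st rest _
    have hset : PySem.List.pySetD (p ++ st :: rest) ((p.length : Nat) : Int)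
        (PySem.Set.add st (tup.getD p.length 0)) =
        p ++ PySem.Set.add st (tup.getD p.length 0) :: rest := by
      rw [PySem.List.pySetD_natCast]; exact pv_set_middle p st _ rest
    have hmap : ((List.range rest.length).map (fun j =>
          (((fun j => ((p.length + j : Nat) : Int)) ∘ Nat.succ) j)))
        = (List.range rest.length).map (fun j =>
          (((p ++ [PySem.Set.add st (tup.getD p.length 0)]).length + j : Nat) : Int)) := by
      apply List.map_congr_left
      intro j _
      simp only [Function.comp_apply, Nat.succ_eq_add_one, List.length_append,
        List.length_cons, List.length_nil]
      push_cast
      ring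
    have hsuffix :
        ∀ (s' : Int),
        ((List.range rest.length).map (fun j =>
            (((p ++ [PySem.Set.add st (tup.getD p.length 0)]).length + j : Nat) : Int))).foldl
          (pvStep tup)
          (s', (p ++ [PySem.Set.add st (tup.getD p.length 0)]) ++ rest)
        = (s' + pvScoreInc tup (p.length + 1) rest,
           (p ++ [PySem.Set.add st (tup.getD p.length 0)]) ++ pvNewSets tup (p.length + 1) rest) := by
      intro s'
      have := ih (p ++ [PySem.Set.add st (tup.getD p.length 0)]) s'
      simpa using this
    by_cases hmem : tup.getD p.length 0 ∈ st
    · have hc : PySem.Set.contains st (tup.getD p.length 0) = true :=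
        (PySem.Set.contains_iff st _).mpr hmem
      have hstep : pvStep tup (s, p ++ st :: rest) ((p.length : Nat) : Int)
          = (s + 1, (p ++ [PySem.Set.add st (tup.getD p.length 0)]) ++ rest) := by
        unfold pvStep
        simp only [hv, hs, hc, if_true]
        rw [PySem.Set.add_of_mem hmem]
        simp
      rw [hstep, hmap, hsuffix (s + 1)]
      simp only [pvScoreInc, pvNewSets, if_pos hmem, PySem.Set.add_of_mem hmem]
      simp [add_assoc, List.append_assoc]
    · have hc : PySem.Set.contains st (tup.getD p.length 0) = false := by
        rw [← Bool.not_eq_true, PySem.Set.contains_iff]; exact hmem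
      have hstep : pvStep tup (s, p ++ st :: rest) ((p.length : Nat) : Int)
          = (s, (p ++ [PySem.Set.add st (tup.getD p.length 0)]) ++ rest) := by
        unfold pvStep
        simp only [hv, hs, hc, Bool.false_eq_true, if_false, hset]
        simp
      rw [hstep, hmap, hsuffix s]
      simp only [pvScoreInc, pvNewSets, if_neg hmem]
      simp [List.append_assoc]

-- pvNewSets / pvScoreInc on a range-indexed list of sets
theorem pv_newSets_map (tup : List Int) :
    ∀ (m a : Nat) (f : Nat → PySem.Set Int),
    pvNewSets tup a ((List.range m).map f)
      = (List.range m).map (fun j => PySem.Set.add (f j) (tup.getD (a + j) 0)) := by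
  intro m
  induction m with
  | zero => intro a f; simp [pvNewSets]
  | succ m ih =>
    intro a f
    rw [List.range_succ_eq_map]
    simp only [List.map_cons, List.map_map, pvNewSets]
    rw [ih (a + 1) (f ∘ Nat.succ)]
    simp [Function.comp, Nat.succ_eq_add_one]
    intro j _
    have h : a + 1 + j = a + (j + 1) := by omega
    rw [h]

theorem pv_scoreInc_map (tup : List Int) :
    ∀ (m a : Nat) (f : Nat → PySem.Set Int),
    pvScoreInc tup a ((List.range m).map f)
      = ((List.range m).map (fun j => if tup.getD (a + j) 0 ∈ f j then (1 : Int) else 0)).sum := by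
  intro m
  induction m with
  | zero => intro a f; simp [pvScoreInc]
  | succ m ih =>
    intro a f
    rw [List.range_succ_eq_map]
    simp only [List.map_cons, List.map_map, pvScoreInc, List.sum_cons]
    rw [ih (a + 1) (f ∘ Nat.succ)]
    simp only [Function.comp_def, Nat.succ_eq_add_one, Nat.add_zero]
    congr 1
    refine congrArg List.sum (List.map_congr_left ?_)
    intro j _
    have h : a + 1 + j = a + (j + 1) := by omega
    rw [h]
    rfl

theorem pv_dups_append (xs : List Int) (x : Int) :
    pvDups (xs ++ [x]) = pvDups xs + (if x ∈ PySem.Set.ofList xs then (1 : Int) else 0) := by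
  unfold pvDups
  rw [PySem.Set.ofList_append_singleton, PySem.Set.add_eq_ite]
  by_cases h : x ∈ PySem.Set.ofList xs <;> simp [h]
  push_cast
  ring

theorem pv_outer (n : Int) (rows : List (List Int)) :
    rows.foldl (fun (st : Int × List (PySem.Set Int)) tup =>
      (PySem.List.pyRange 0 n 1).foldl (pvStep tup) st)
      (0, (PySem.List.pyRange 0 n 1).map (fun _ => PySem.Set.empty))
    = (((List.range n.toNat).map (fun j => pvDups (pvCol rows j))).sum,
       (List.range n.toNat).map (fun j => PySem.Set.ofList (pvCol rows j))) := by
  induction rows using List.reverseRecOn with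
  | nil =>
    rw [PySem.List.pyRange_one]
    simp only [List.foldl_nil]
    simp [pvCol, pvDups, Function.comp_def, List.map_const']
  | append_singleton rows tup ih =>
    rw [List.foldl_append, ih, List.foldl_cons, List.foldl_nil]
    have hin := pv_inner tup
      ((List.range n.toNat).map (fun j => PySem.Set.ofList (pvCol rows j))) []
      (((List.range n.toNat).map (fun j => pvDups (pvCol rows j))).sum)
    simp only [List.length_nil, List.nil_append, Nat.zero_add, List.length_map,
      List.length_range] at hin
    have hrange : PySem.List.pyRange 0 n 1
        = (List.range n.toNat).map (fun j => ((j : Nat) : Int)) := by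
      rw [PySem.List.pyRange_one]
      simp
    rw [hrange, hin]
    rw [pv_newSets_map, pv_scoreInc_map]
    have hcol : ∀ j : Nat, pvCol (rows ++ [tup]) j = pvCol rows j ++ [tup.getD j 0] := by
      intro j; simp [pvCol]
    simp only [Nat.zero_add, Prod.mk.injEq]
    constructor
    · rw [← PySem.List.sum_map_add_int]
      apply congrArg
      apply List.map_congr_left
      intro j _
      rw [hcol j, pv_dups_append]
    · apply List.map_congr_left
      intro j _
      rw [hcol j, PySem.Set.ofList_append_singleton, PySem.Set.add_eq_ite]

theorem pv_A_eq_sum (tuples : List (List Int)) (n : Int) :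
    count_vertically tuples n
      = ((List.range n.toNat).map (fun j => pvDups (pvCol tuples j))).sum := by
  unfold count_vertically
  rw [PySem.List.foldl_add]
  rw [PySem.List.pyRange_one]
  simp only [List.map_map, Int.zero_add, Int.sub_zero]
  apply congrArg
  apply List.map_congr_left
  intro j _
  simp only [Function.comp]
  rw [PySem.List.foldl_append_singleton_eq_map]
  simp [pvDups, pvCol]

-- ===== VERDICT (by name: the statement is the Claim_ definition above) =====
theorem count_vertically_spec : Claim_equal_count_vertically := by
  intro tuples n _ _
  unfold Spec_count_vertically
  have hport : count_vertically_alt tuples n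
      = (tuples.foldl (fun (st : Int × List (PySem.Set Int)) tup =>
          (PySem.List.pyRange 0 n 1).foldl (pvStep tup) st)
          (0, (PySem.List.pyRange 0 n 1).map (fun _ => PySem.Set.empty))).1 := rfl
  rw [hport, pv_outer, pv_A_eq_sum]
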